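-- pv_equiv track=rewrite | github.com/adiatgit/leetcode | thristyCrow.py | thristyCrow
-- ===== SOURCE A (Python) =====
-- def thristyCrow(A, k):
--     A.sort()
--     no_of_rocks = 0
--     for i in range(k):
--         no_of_rocks += A[i]*(len(A) -i)
--         for j in range(i,k):
--             A[j] =A[j] - A[i]
--     return no_of_rocks
-- ===== SOURCE B (Python) =====
-- def thristyCrow(A, k):
--     s = sorted(A)
--     n = len(A)
--     return sum(s[i] * (n - i) for i in range(k))
-- ===== Notes on version B (the rewrite author's own statement) =====
-- stated objective: simpler
-- what changed: Replaced the mutating double loop (whose inner pass only ever zeroes A[i]) by a single non-mutating sum over the first k sorted elements weighted by the remaining length.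
-- outside the precondition, e.g. on thristyCrow([1], 2): A raises IndexError, B raises IndexError
import Mathlib
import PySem

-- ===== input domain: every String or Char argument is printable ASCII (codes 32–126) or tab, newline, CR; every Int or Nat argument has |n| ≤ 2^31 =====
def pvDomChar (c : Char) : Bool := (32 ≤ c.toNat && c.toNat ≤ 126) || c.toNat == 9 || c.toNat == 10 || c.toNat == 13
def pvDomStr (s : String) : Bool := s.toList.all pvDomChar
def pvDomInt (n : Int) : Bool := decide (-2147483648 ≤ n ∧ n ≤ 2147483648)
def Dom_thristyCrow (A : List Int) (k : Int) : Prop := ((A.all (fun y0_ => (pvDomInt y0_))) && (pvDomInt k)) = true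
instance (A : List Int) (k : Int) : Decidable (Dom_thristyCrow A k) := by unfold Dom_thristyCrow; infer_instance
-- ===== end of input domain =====

-- B drops A's inner mutation loop (which only ever zeroes A[i]) and directly sums the first k
-- sorted elements weighted by remaining length. Equivalence is about the RETURN value only:
-- Python A sorts and mutates its argument in place, B does not.

-- ===== PORT A =====
-- A mutates the list; the fold carries the current list as state. Indices used are
-- nonnegative and (under Pre_) in range, where pyGetD/pySetD are exact.
def thristyCrow (A : List Int) (k : Int) : Int :=
  let As := PySem.List.sorted A (fun x => x)
  ((PySem.List.pyRange 0 k 1).foldl (fun (st : List Int × Int) i =>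
      let a := st.1
      let r := st.2 + PySem.List.pyGetD a i 0 * ((a.length : Int) - i)
      let a' := (PySem.List.pyRange i k 1).foldl
        (fun aa j => PySem.List.pySetD aa j (PySem.List.pyGetD aa j 0 - PySem.List.pyGetD aa i 0)) a
      (a', r)) (As, 0)).2

-- ===== PORT B =====
def thristyCrow_alt (A : List Int) (k : Int) : Int :=
  let s := PySem.List.sorted A (fun x => x)
  let n : Int := (A.length : Int)
  (PySem.List.pyRange 0 k 1).foldl (fun acc i => acc + PySem.List.pyGetD s i 0 * (n - i)) 0

-- ===== PRECONDITION & SPEC =====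
-- A raises IndexError when k > len(A) (it indexes A[i] for i up to k-1); exactly those inputs are excluded.
def Pre_thristyCrow (A : List Int) (k : Int) : Prop := k ≤ (A.length : Int)
instance (A : List Int) (k : Int) : Decidable (Pre_thristyCrow A k) := by unfold Pre_thristyCrow; infer_instance
def pvWitness_thristyCrow : List Int × Int := ([3, 1, 2], 2)

def Spec_thristyCrow (A : List Int) (k : Int) (out : Int) : Prop := out = thristyCrow_alt A k
instance (A : List Int) (k : Int) (out : Int) : Decidable (Spec_thristyCrow A k out) := by unfold Spec_thristyCrow; infer_instance

-- ===== CLAIM (what is proved, stated in full; the proofs are below) =====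
def Claim_equal_thristyCrow : Prop := ∀ (A : List Int) (k : Int), Dom_thristyCrow A k → Pre_thristyCrow A k → Spec_thristyCrow A k (thristyCrow A k)

-- ===== LEMMAS AND PROOFS =====

-- One inner-loop step is the identity once the pivot entry is 0.
theorem pv_inner_id (L : List Int) (aa : List Int) (i : Int)
    (h0 : PySem.List.pyGetD aa i 0 = 0)
    (hL : ∀ j ∈ L, 0 ≤ j) :
    L.foldl (fun aa j => PySem.List.pySetD aa j (PySem.List.pyGetD aa j 0 - PySem.List.pyGetD aa i 0)) aa = aa := by
  induction L with
  | nil => rfl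
  | cons j L ih =>
    have hj : 0 ≤ j := hL j (List.mem_cons_self ..)
    have hstep : PySem.List.pySetD aa j (PySem.List.pyGetD aa j 0 - PySem.List.pyGetD aa i 0) = aa := by
      rw [h0, sub_zero]
      by_cases hlt : j < (aa.length : Int)
      · rw [PySem.List.pyGetD_eq_getElem aa (0 : Int) hj hlt,
            PySem.List.pySetD_of_nonneg _ _ hj]
        exact List.set_getElem_self _
      · -- index out of range: pySetD leaves the list unchanged
        rw [PySem.List.pySetD_of_nonneg _ _ hj]
        rw [List.set_eq_of_length_le (by omega)]
    rw [List.foldl_cons, hstep]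
    exact ih (fun x hx => hL x (List.mem_cons_of_mem _ hx))

-- The whole inner loop only zeroes entry i.
theorem pv_inner_set (a : List Int) (i k : Int)
    (h0 : 0 ≤ i) (hlen : i < (a.length : Int)) (hik : i < k) :
    (PySem.List.pyRange i k 1).foldl
      (fun aa j => PySem.List.pySetD aa j (PySem.List.pyGetD aa j 0 - PySem.List.pyGetD aa i 0)) a
    = a.set i.toNat 0 := by
  rw [PySem.List.pyRange_one_cons hik, List.foldl_cons, sub_self,
      PySem.List.pySetD_of_nonneg _ _ h0]
  apply pv_inner_id
  · rw [PySem.List.pyGetD_eq_getElem _ (0 : Int) h0 (by simpa using hlen)]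
    have hi : i.toNat < a.length := by omega
    exact List.getElem_set_self (by simpa using hi)
  · intro j hj
    have := (PySem.List.mem_pyRange_one).1 hj
    omega

-- Outer-loop invariant: the carried list agrees with the sorted list from index t on,
-- so A's accumulator equals B's partial sum over the same range.
theorem pv_outer (s : List Int) (k : Int) (n : Nat) :
    ∀ (t : Int) (a : List Int) (r : Int),
      (k - t).toNat = n → 0 ≤ t → k ≤ (s.length : Int) → a.length = s.length →
      (∀ m : Nat, t ≤ (m : Int) → a[m]? = s[m]?) →
      ((PySem.List.pyRange t k 1).foldl (fun (st : List Int × Int) i =>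
          let a := st.1
          let r := st.2 + PySem.List.pyGetD a i 0 * ((a.length : Int) - i)
          let a' := (PySem.List.pyRange i k 1).foldl
            (fun aa j => PySem.List.pySetD aa j (PySem.List.pyGetD aa j 0 - PySem.List.pyGetD aa i 0)) a
          (a', r)) (a, r)).2
      = (PySem.List.pyRange t k 1).foldl
          (fun acc i => acc + PySem.List.pyGetD s i 0 * ((s.length : Int) - i)) r := by
  induction n with
  | zero =>
    intro t a r hn ht hk hlen hagree
    rw [PySem.List.pyRange_one_eq_nil (by omega)]
    rfl
  | succ n ih =>
    intro t a r hn ht hk hlen hagree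
    have htk : t < k := by omega
    have htlen : t < (a.length : Int) := by omega
    rw [PySem.List.pyRange_one_cons htk, List.foldl_cons, List.foldl_cons]
    simp only
    have hget : PySem.List.pyGetD a t 0 = PySem.List.pyGetD s t 0 := by
      rw [PySem.List.pyGetD_eq_getElem a (0 : Int) ht htlen,
          PySem.List.pyGetD_eq_getElem s (0 : Int) ht (by omega)]
      have := hagree t.toNat (by omega)
      have h1 : t.toNat < a.length := by omega
      have h2 : t.toNat < s.length := by omega
      simpa [List.getElem?_eq_getElem, h1, h2] using this
    rw [pv_inner_set a t k ht htlen htk, hget, hlen]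
    apply ih
    · omega
    · omega
    · exact hk
    · simp [hlen]
    · intro m hm
      rw [List.getElem?_set_ne (by omega)]
      exact hagree m (by omega)

-- ===== VERDICT (by name: the statement is the Claim_ definition above) =====
theorem thristyCrow_spec : Claim_equal_thristyCrow := by
  intro A k _ hpre
  unfold Pre_thristyCrow at hpre
  unfold Spec_thristyCrow thristyCrow thristyCrow_alt
  simp only
  have hlen : (PySem.List.sorted A (fun x => x)).length = A.length :=
    PySem.List.length_sorted ..
  rw [pv_outer (PySem.List.sorted A (fun x => x)) k (k - 0).toNat 0
        (PySem.List.sorted A (fun x => x)) 0 rfl le_rfl (by omega) rfl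
        (fun m _ => rfl), hlen]
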